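-- pv_equiv track=rewrite | github.com/adykumar/DangerWager | Indy/015-11.2-EPI-SearchSortedArrayForEntryEqualToIndex.py | search_entry_equal_to_index
-- ===== SOURCE A (Python) =====
-- from typing import List
--
-- def search_entry_equal_to_index(input: List[int]) -> int:
--     left, right = 0, len(input)-1
--
--     # search until start and end cross over
--     while left <= right:
--         mid = (left+right)//2
--         diff = input[mid] - mid
--
--         # if diff == 0, return this index
--         if diff == 0:
--             return mid
--         # if diff > 0 i.e. index is smaller than the value, prune right half of the array
--         elif diff > 0:
--             right = mid - 1
--         else: # diff < 0 i.e. index is greater than the value at the index,  prune left side of the array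
--             left = mid+1
--
--
--     # if not found, return -1
--     return -1
-- ===== SOURCE B (Python) =====
-- from typing import List
--
-- def search_entry_equal_to_index(input: List[int]) -> int:
--     # Recursive search over (offset, window size) instead of mutable left/right
--     # bounds: go(lo, size) searches the window input[lo : lo+size].
--     def go(lo: int, size: int) -> int:
--         if size == 0:
--             return -1
--         k = (size - 1) // 2
--         mid = lo + k
--         v = input[mid]
--         if v == mid:
--             return mid
--         if v > mid:
--             return go(lo, k)
--         return go(mid + 1, size - k - 1)
--     return go(0, len(input))
-- ===== Notes on version B (the rewrite author's own statement) =====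
-- stated objective: alternative
-- what changed: Replaced the iterative while-loop over mutable left/right Int bounds by structural recursion on the window as (offset, size) pairs of natural numbers, computing the probe as offset + (size-1)//2 and comparing input[mid] to mid directly instead of forming a diff, with the empty-window base case returning -1.
import Mathlib
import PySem

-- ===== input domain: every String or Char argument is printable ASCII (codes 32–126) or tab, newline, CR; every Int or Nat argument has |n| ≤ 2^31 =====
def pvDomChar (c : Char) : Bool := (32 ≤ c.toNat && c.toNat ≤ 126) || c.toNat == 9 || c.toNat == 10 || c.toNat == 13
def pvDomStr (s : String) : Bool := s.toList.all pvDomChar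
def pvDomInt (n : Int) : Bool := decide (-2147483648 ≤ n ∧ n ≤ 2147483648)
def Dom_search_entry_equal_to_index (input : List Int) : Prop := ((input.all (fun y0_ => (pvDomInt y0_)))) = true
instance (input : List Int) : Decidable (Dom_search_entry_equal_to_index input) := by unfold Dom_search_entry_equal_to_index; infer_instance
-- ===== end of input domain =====

-- B replaces A's while-loop over mutable Int bounds (left, right) by structural recursion
-- on the window (offset, size): a different decomposition of the search, same cost.

-- ===== PORT A =====
-- A's while-loop as a fuel-driven step function over the mutable state pair (left, right).
-- Fuel is only a totality guard: the window shrinks strictly each iteration, so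
-- input.length + 1 units are never exhausted from the entry point.
def pvALoop (input : List Int) : Nat → Int × Int → Int
  | 0, _ => -1
  | fuel + 1, (left, right) =>
    if left ≤ right then
      let mid := PySem.Int.floordiv (left + right) 2
      let diff := (PySem.List.pyGet? input mid).getD 0 - mid  -- index always in range when reached from the entry point
      if diff = 0 then mid
      else if diff > 0 then pvALoop input fuel (left, mid - 1)
      else pvALoop input fuel (mid + 1, right)
    else -1

def search_entry_equal_to_index (input : List Int) : Int :=
  pvALoop input (input.length + 1) (0, (input.length : Int) - 1)

-- ===== PORT B =====
-- B's go(lo, size): recursion on the Nat window (offset, size), the probe computed as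
-- lo + (size-1)/2 in Nat arithmetic and input[mid] compared to mid directly.
-- Fuel is only a totality guard: size strictly shrinks, so input.length units are
-- never exhausted from the entry point.
def pvBGo (input : List Int) : Nat → Nat → Nat → Int
  | 0, _, _ => -1
  | fuel + 1, lo, size =>
    if size = 0 then -1
    else
      let k := (size - 1) / 2
      let mid := lo + k
      let v := input.getD mid 0
      if v = (mid : Int) then (mid : Int)
      else if v > (mid : Int) then pvBGo input fuel lo k
      else pvBGo input fuel (mid + 1) (size - k - 1)

def search_entry_equal_to_index_alt (input : List Int) : Int :=
  pvBGo input input.length 0 input.length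

-- ===== PRECONDITION & SPEC =====
def Spec_search_entry_equal_to_index (input : List Int) (out : Int) : Prop := out = search_entry_equal_to_index_alt input
instance (input : List Int) (out : Int) : Decidable (Spec_search_entry_equal_to_index input out) := by unfold Spec_search_entry_equal_to_index; infer_instance

-- ===== CLAIM (what is proved, stated in full; the proofs are below) =====
def Claim_equal_search_entry_equal_to_index : Prop := ∀ (input : List Int), Dom_search_entry_equal_to_index input → Spec_search_entry_equal_to_index input (search_entry_equal_to_index input)

-- ===== LEMMAS AND PROOFS =====
-- Bridge: A's loop from state (lo, lo+size-1) computes exactly B's go lo size,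
-- provided the window lies inside the list and both fuels cover the window size.
theorem pvALoop_eq_pvBGo (input : List Int) (fa fb lo size : Nat)
    (hfa : size ≤ fa) (hfb : size ≤ fb) (hin : lo + size ≤ input.length) :
    pvALoop input fa ((lo : Int), (lo : Int) + (size : Int) - 1) = pvBGo input fb lo size := by
  induction fa generalizing fb lo size with
  | zero =>
      have : size = 0 := Nat.le_zero.mp hfa
      subst this
      cases fb with
      | zero => rfl
      | succ fb' => simp [pvALoop, pvBGo]
  | succ f ih =>
      by_cases hsz : size = 0
      · subst hsz
        cases fb with
        | zero => simp [pvALoop, pvBGo]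
        | succ fb' => simp [pvALoop, pvBGo]
      · have h1 : 1 ≤ size := Nat.one_le_iff_ne_zero.mpr hsz
        obtain ⟨fb', rfl⟩ : ∃ fb'', fb = fb'' + 1 := ⟨fb - 1, by omega⟩
        show (if ((lo : Int)) ≤ (lo : Int) + (size : Int) - 1 then _ else (-1 : Int))
            = (if size = 0 then (-1 : Int) else _)
        rw [if_pos (by omega), if_neg hsz]
        dsimp only
        set k := (size - 1) / 2 with hk
        have hmid : PySem.Int.floordiv ((lo : Int) + ((lo : Int) + (size : Int) - 1)) 2
            = ((lo + k : Nat) : Int) := by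
          have h2 : (0:Int) < 2 := by norm_num
          rw [PySem.Int.floordiv_eq_ediv_of_pos h2]
          push_cast
          omega
        rw [hmid]
        have hloK : lo + k < input.length := by omega
        set v := input.getD (lo + k) 0 with hv
        have hget : PySem.List.pyGet? input ((lo + k : Nat) : Int) = some v := by
          rw [PySem.List.pyGet?_natCast]
          simp [hv, List.getD, List.getElem?_eq_getElem hloK]
        rw [hget]
        simp only [Option.getD_some]
        by_cases heq : v = ((lo + k : Nat) : Int)
        · rw [if_pos (by omega), if_pos heq]
        · rw [if_neg (by omega), if_neg heq]
          by_cases hgt : v > ((lo + k : Nat) : Int)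
          · rw [if_pos (by omega), if_pos hgt]
            have hleft : ((lo + k : Nat) : Int) - 1 = (lo : Int) + (k : Int) - 1 := by
              push_cast; ring
            rw [hleft]
            exact ih fb' lo k (by omega) (by omega) (by omega)
          · rw [if_neg (by omega), if_neg hgt]
            have hlo' : ((lo + k : Nat) : Int) + 1 = ((lo + k + 1 : Nat) : Int) := by push_cast; ring
            have hhi' : (lo : Int) + (size : Int) - 1
                = ((lo + k + 1 : Nat) : Int) + ((size - k - 1 : Nat) : Int) - 1 := by
              push_cast; omega
            rw [hlo', hhi']
            exact ih fb' (lo + k + 1) (size - k - 1) (by omega) (by omega) (by omega)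

-- ===== VERDICT (by name: the statement is the Claim_ definition above) =====
theorem search_entry_equal_to_index_spec : Claim_equal_search_entry_equal_to_index := by
  intro input _
  unfold Spec_search_entry_equal_to_index search_entry_equal_to_index search_entry_equal_to_index_alt
  have := pvALoop_eq_pvBGo input (input.length + 1) input.length 0 input.length (by omega) (le_refl _) (by omega)
  simpa using this
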